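-- pv_equiv track=rewrite | github.com/irupawala/Ibrahim-List | Ibrahim Personal/Ready/ADMSU/AoS/Assignments/Week 2/[3] bwmatching/bwmatching.py | PreprocessBWT
-- ===== SOURCE A (Python) =====
-- def PreprocessBWT(bwt):
--   """
--   Preprocess the Burrows-Wheeler Transform bwt of some text
--   and compute as a result:
--     * first_occurence - for each character C in bwt, first_occurence[C] is the first position
--         of this character in the sorted array of
--         all characters of the text.
--     * count - for each character C in bwt and each position P in bwt,
--         count[C][P] is the number of occurrences of character C in bwt
--         from position 0 to position P inclusive.
--   """
--   first = sorted(bwt) # O(n.logn)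
--   unqiue_character = first[0]
--   first_occurence = {'$':0}
--   count = {}
--   unqiue_character_counter = {}
--   len_occ_count = len(bwt) + 1
--
--   for index in range(len(first)):
--       Symbol_first = first[index]
--       Symbol_last = bwt[index]
--
--       # Updating first_occurence when new symbol is encountered in sorted_array
--       if Symbol_first != unqiue_character:
--           first_occurence[Symbol_first] = index
--           unqiue_character = Symbol_first
--
--       if Symbol_last not in count:
--           count[Symbol_last] = [0] * len_occ_count # it is important to build count of length
--                                                               # len(bwt) + 1 because as indicated in the lecture
--                                                               # slides at starting distance of 0 characters (index 0)
--                                                               # all the unique chracters should have 0 value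
--           counter = 1
--           unqiue_character_counter[Symbol_last] = counter
--
--           for Symbol in unqiue_character_counter:
--               count[Symbol][index+1] = unqiue_character_counter[Symbol]
--
--       else:
--           counter = unqiue_character_counter[Symbol_last] + 1
--           unqiue_character_counter[Symbol_last] = counter
--
--           for Symbol in unqiue_character_counter: # It is important to hover and update each characters count
--                                                   # value at each index to get time complexity
--                                                   # O(|LastColumn| + O|unqiue_character_counter|) to
--                                                   # create count
--
--               count[Symbol][index+1] = unqiue_character_counter[Symbol]
--
--   return (first_occurence, count)
-- ===== SOURCE B (Python) =====
-- def PreprocessBWT(bwt):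
--   # Simpler decomposition: first_occurence by scanning the sorted string for change
--   # points; count built column-by-column as independent prefix sums.
--   first = sorted(bwt)
--   first_occurence = {'$': 0}
--   for i in range(1, len(first)):
--     if first[i] != first[i - 1]:
--       first_occurence[first[i]] = i
--   count = dict.fromkeys(bwt)
--   n = len(bwt)
--   for c in count:
--     col = [0] * (n + 1)
--     for i in range(n):
--       col[i + 1] = col[i] + (1 if bwt[i] == c else 0)
--     count[c] = col
--   return (first_occurence, count)
-- ===== Notes on version B (the rewrite author's own statement) =====
-- stated objective: simpler
-- what changed: A's single loop that re-updates every seen character's count column at every position (with an inner loop over the counter dict) is replaced by a change-point scan of the sorted string for first_occurence plus independent per-character prefix-sum columns for count.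
-- crash fix: On the empty string A raises IndexError (first[0] of the empty sorted list); B returns ({'$': 0}, {}). — e.g. on PreprocessBWT(""): A raises IndexError, B returns ([("$", 0)], [])
import Mathlib
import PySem

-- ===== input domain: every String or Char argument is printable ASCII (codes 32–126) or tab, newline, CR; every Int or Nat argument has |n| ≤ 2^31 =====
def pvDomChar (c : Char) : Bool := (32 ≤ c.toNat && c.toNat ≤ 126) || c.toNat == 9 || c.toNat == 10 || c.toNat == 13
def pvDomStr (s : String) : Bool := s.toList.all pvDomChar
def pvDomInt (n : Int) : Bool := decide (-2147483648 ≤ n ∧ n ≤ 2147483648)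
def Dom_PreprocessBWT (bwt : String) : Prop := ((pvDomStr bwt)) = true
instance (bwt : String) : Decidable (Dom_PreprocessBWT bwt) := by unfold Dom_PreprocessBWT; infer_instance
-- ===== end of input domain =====

-- B replaces A's single combined loop (incremental count dict updated for every seen
-- symbol at every position) by a change-point scan of the sorted string for
-- first_occurence and independent per-character prefix-sum columns for count (simpler decomposition).

-- ===== PORT A =====
-- loop body for (first_occurence, unqiue_character): the first two state variables of A's loop
def pvStepFirst (first : List Char) (st : PySem.Dict String Int × Char) (index : Int) :
    PySem.Dict String Int × Char :=
  let Symbol_first := PySem.List.pyGetD first index ' '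
  if Symbol_first ≠ st.2 then
    (PySem.Dict.insert st.1 (String.ofList [Symbol_first]) index, Symbol_first)
  else st

-- loop body for (count, unqiue_character_counter): the other two state variables of A's loop
def pvStepCount (l : List Char) (st : PySem.Dict String (List Int) × PySem.Dict String Int) (index : Int) :
    PySem.Dict String (List Int) × PySem.Dict String Int :=
  let Symbol_last := PySem.List.pyGetD l index ' '
  let key := String.ofList [Symbol_last]
  if PySem.Dict.contains st.1 key = false then
    let cnt1 := PySem.Dict.insert st.1 key (List.replicate (l.length + 1) (0 : Int))
    let ucc1 := PySem.Dict.insert st.2 key (1 : Int)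
    ((PySem.Dict.keys ucc1).foldl
      (fun c2 s => PySem.Dict.modify c2 s []
        (fun col => PySem.List.pySetD col (index + 1) (PySem.Dict.getD ucc1 s 0))) cnt1,
     ucc1)
  else
    let ucc1 := PySem.Dict.insert st.2 key (PySem.Dict.getD st.2 key 0 + 1)
    ((PySem.Dict.keys ucc1).foldl
      (fun c2 s => PySem.Dict.modify c2 s []
        (fun col => PySem.List.pySetD col (index + 1) (PySem.Dict.getD ucc1 s 0))) st.1,
     ucc1)

def PreprocessBWT (bwt : String) : (List (String × Int)) × (List (String × List Int)) :=
  let l := bwt.toList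
  let first := PySem.List.sorted l (fun c => c)
  match first with
  | [] => ([], [])   -- Python raises IndexError here (first[0]); excluded by Pre_PreprocessBWT
  | u0 :: _ =>
    let res := (PySem.List.pyRange 0 (l.length : Int)).foldl
      (fun st index => (pvStepFirst first st.1 index, pvStepCount l st.2 index))
      ((PySem.Dict.insert (PySem.Dict.empty) "$" (0 : Int), u0),
       ((PySem.Dict.empty : PySem.Dict String (List Int)),
        (PySem.Dict.empty : PySem.Dict String Int)))
    ((res.1.1).items, (res.2.1).items)

-- ===== PORT B =====
-- loop body of B's first_occurence loop (change points of the sorted list)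
def pvStepFirstAlt (first : List Char) (fo : PySem.Dict String Int) (i : Int) :
    PySem.Dict String Int :=
  if PySem.List.pyGetD first i ' ' ≠ PySem.List.pyGetD first (i - 1) ' ' then
    PySem.Dict.insert fo (String.ofList [PySem.List.pyGetD first i ' ']) i
  else fo

def PreprocessBWT_alt (bwt : String) : (List (String × Int)) × (List (String × List Int)) :=
  let l := bwt.toList
  let first := PySem.List.sorted l (fun c => c)
  let fo := (PySem.List.pyRange 1 (first.length : Int)).foldl (pvStepFirstAlt first)
    (PySem.Dict.insert (PySem.Dict.empty) "$" (0 : Int))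
  let n := l.length
  let cnt := (PySem.List.dedup l).foldl
    (fun d c =>
      let col := (PySem.List.pyRange 0 (n : Int)).foldl
        (fun col i => PySem.List.pySetD col (i + 1)
          (PySem.List.pyGetD col i 0 + if PySem.List.pyGetD l i ' ' = c then 1 else 0))
        (List.replicate (n + 1) (0 : Int))
      PySem.Dict.insert d (String.ofList [c]) col)
    (PySem.Dict.empty : PySem.Dict String (List Int))
  (fo.items, cnt.items)

-- ===== PRECONDITION & SPEC =====
-- Pre_ excludes only the empty string, on which A raises IndexError (first[0]).
def Pre_PreprocessBWT (bwt : String) : Prop := bwt ≠ ""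
instance (bwt : String) : Decidable (Pre_PreprocessBWT bwt) := by unfold Pre_PreprocessBWT; infer_instance
def pvWitness_PreprocessBWT : String := "ab$"

-- On the empty string A raises IndexError (first[0] on the empty sorted list); B returns ({'$': 0}, {}).
def Raises_PreprocessBWT (bwt : String) : Prop := bwt = ""
instance (bwt : String) : Decidable (Raises_PreprocessBWT bwt) := by unfold Raises_PreprocessBWT; infer_instance
def pvRaiseWitness_PreprocessBWT : String := ""
def pvRaiseWitnessOut_PreprocessBWT : (List (String × Int)) × (List (String × List Int)) :=
  ([("$", 0)], [])

def Spec_PreprocessBWT (bwt : String) (out : (List (String × Int)) × (List (String × List Int))) : Prop := out = PreprocessBWT_alt bwt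
instance (bwt : String) (out : (List (String × Int)) × (List (String × List Int))) : Decidable (Spec_PreprocessBWT bwt out) := by unfold Spec_PreprocessBWT; infer_instance

-- ===== CLAIM (what is proved, stated in full; the proofs are below) =====
def Claim_equal_PreprocessBWT : Prop := ∀ (bwt : String), Dom_PreprocessBWT bwt → Pre_PreprocessBWT bwt → Spec_PreprocessBWT bwt (PreprocessBWT bwt)
def Claim_raises_PreprocessBWT : Prop := (∀ (bwt : String), Dom_PreprocessBWT bwt → Raises_PreprocessBWT bwt → ¬ Pre_PreprocessBWT bwt) ∧ (Dom_PreprocessBWT (pvRaiseWitness_PreprocessBWT) ∧ Raises_PreprocessBWT (pvRaiseWitness_PreprocessBWT) ∧ PreprocessBWT_alt (pvRaiseWitness_PreprocessBWT) = pvRaiseWitnessOut_PreprocessBWT)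

-- ===== LEMMAS AND PROOFS =====

def pvKeyS (c : Char) : String := String.ofList [c]
def pvPref (l : List Char) (c : Char) (j : Nat) : Int := ((l.take j).count c : Int)
def pvColK (l : List Char) (k : Nat) (c : Char) : List Int :=
  (List.range (l.length + 1)).map (fun j => if j ≤ k then pvPref l c j else 0)
theorem pvKeyS_inj : Function.Injective pvKeyS := by
  intro a b h
  have := congrArg String.toList h
  simpa [pvKeyS] using this
theorem pv_set_map_range (n : Nat) (f : Nat → Int) (m : Nat) (v : Int) :
    ((List.range n).map f).set m v = (List.range n).map (fun j => if j = m then v else f j) := by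
  apply List.ext_getElem
  · simp
  · intro i h1 h2
    rw [List.getElem_set]
    simp only [List.getElem_map, List.getElem_range]
    by_cases h : i = m
    · simp [h]
    · simp only [h, if_false]
      rw [if_neg (fun hh : m = i => h hh.symm)]
theorem pvPref_succ (l : List Char) (c : Char) (k : Nat) (hk : k < l.length) :
    pvPref l c (k + 1) = pvPref l c k + (if l.getD k ' ' = c then 1 else 0) := by
  have ht : l.take (k+1) = l.take k ++ [l[k]] := by
    rw [List.take_add_one]; simp [List.getElem?_eq_getElem hk]
  rw [List.getD_eq_getElem?_getD, List.getElem?_eq_getElem hk]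
  simp only [pvPref, ht, List.count_append, List.count_singleton, Option.getD_some]
  by_cases h : l[k] = c
  · simp [h]
  · simp [h]
theorem pvPref_zero_of_not_mem (l : List Char) (c : Char) (j k : Nat) (hj : j ≤ k)
    (hc : c ∉ l.take k) : pvPref l c j = 0 := by
  have : l.take j = (l.take k).take j := by rw [List.take_take, Nat.min_eq_left hj]
  simp [pvPref, this]
  rw [List.count_eq_zero]
  intro hmem
  exact hc (List.mem_of_mem_take hmem)
theorem pvColK_set (l : List Char) (k : Nat) (c : Char) (_hk : k < l.length) :
    (pvColK l k c).set (k + 1) (pvPref l c (k + 1)) = pvColK l (k + 1) c := by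
  unfold pvColK
  rw [pv_set_map_range]
  apply List.map_congr_left
  intro j hj
  split_ifs with h1 h2 h3 <;> first | (subst h1; rfl) | rfl | omega
theorem pvColK_zero_of_not_mem (l : List Char) (k : Nat) (c : Char) (hc : c ∉ l.take k) :
    pvColK l k c = List.replicate (l.length + 1) 0 := by
  unfold pvColK
  rw [List.eq_replicate_iff]
  constructor
  · simp
  · intro b hb
    simp at hb
    obtain ⟨j, hj, rfl⟩ := hb
    split_ifs with h
    · exact pvPref_zero_of_not_mem l c j k h hc
    · rfl
theorem pv_getD_mapDict {ν : Type} (D : List Char) (F : Char → ν) (c0 : Char) (dflt : ν) :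
    PySem.Dict.getD (PySem.Dict.mk (D.map fun c => (pvKeyS c, F c))) (pvKeyS c0) dflt
      = if c0 ∈ D then F c0 else dflt := by
  induction D with
  | nil => simp [PySem.Dict.getD_eq_get?_getD]; rfl
  | cons d D ih =>
    rw [PySem.Dict.getD_eq_get?_getD] at *
    simp only [List.map_cons, PySem.Dict.get?_mk_cons]
    by_cases h : d = c0
    · subst h; simp
    · have : (pvKeyS d == pvKeyS c0) = false := by
        simp; intro he; exact h (pvKeyS_inj he)
      simp only [this, Bool.false_eq_true, if_false, ih, List.mem_cons]
      have : ¬ c0 = d := fun hh => h hh.symm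
      by_cases hm : c0 ∈ D <;> simp [hm, this]
theorem pv_contains_mapDict {ν : Type} (D : List Char) (F : Char → ν) (c0 : Char) :
    PySem.Dict.contains (PySem.Dict.mk (D.map fun c => (pvKeyS c, F c))) (pvKeyS c0)
      = decide (c0 ∈ D) := by
  rw [PySem.Dict.contains_eq_decide_mem_keys, PySem.Dict.keys_mk]
  simp only [List.map_map]
  by_cases h : c0 ∈ D
  · simp only [h, decide_true]
    rw [decide_eq_true_iff]
    exact List.mem_map_of_mem (f := pvKeyS) h
  · simp [h]
    intro c hc he
    exact absurd (pvKeyS_inj he) (by rintro rfl; exact h hc)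
theorem pv_first_inv (first : List Char) (k : Nat) (h1 : 1 ≤ k) (hk : k ≤ first.length)
    (d0 : PySem.Dict String Int) :
    (PySem.List.pyRange 0 (k : Int)).foldl (pvStepFirst first) (d0, first.getD 0 ' ')
      = ((PySem.List.pyRange 1 (k : Int)).foldl (pvStepFirstAlt first) d0, first.getD (k - 1) ' ') := by
  induction k with
  | zero => omega
  | succ k ih =>
    by_cases hk1 : k = 0
    · subst hk1
      have e0 : PySem.List.pyRange 0 (((1 : Nat)) : Int) = [0] := by decide
      have e1 : PySem.List.pyRange 1 (((1 : Nat)) : Int) = [] := by decide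
      rw [e0, e1]
      simp [pvStepFirst, PySem.List.pyGetD_zero]
    · have h1k : 1 ≤ k := by omega
      have hke : (((k + 1 : Nat)) : Int) = (k : Int) + 1 := by push_cast; ring
      rw [hke, PySem.List.pyRange_one_succ_right (by positivity),
        PySem.List.pyRange_one_succ_right (by exact_mod_cast h1k),
        List.foldl_append, List.foldl_append, ih h1k (by omega)]
      have hc1 : ((k : Int) - 1) = ((k - 1 : Nat) : Int) := by omega
      simp only [List.foldl_cons, List.foldl_nil, pvStepFirst, pvStepFirstAlt, hc1,
        PySem.List.pyGetD_natCast]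
      simp only [Nat.add_sub_cancel]
      split_ifs with h
      · rfl
      · simp only [ne_eq, not_not] at h
        rw [h]
theorem pv_col_alt (l : List Char) (c : Char) (k : Nat) (hk : k ≤ l.length) :
    (PySem.List.pyRange 0 (k : Int)).foldl
        (fun col i => PySem.List.pySetD col (i + 1)
          (PySem.List.pyGetD col i 0 + if PySem.List.pyGetD l i ' ' = c then 1 else 0))
        (List.replicate (l.length + 1) (0 : Int))
      = pvColK l k c := by
  induction k with
  | zero =>
    simp only [Nat.cast_zero, PySem.List.pyRange_one_eq_nil (le_refl 0), List.foldl_nil]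
    exact (pvColK_zero_of_not_mem l 0 c (by simp)).symm
  | succ k ih =>
    have hke : (((k + 1 : Nat)) : Int) = (k : Int) + 1 := by push_cast; ring
    rw [hke, PySem.List.pyRange_one_succ_right (by positivity), List.foldl_append,
      ih (by omega)]
    have hkl : k < l.length := by omega
    have hgd : PySem.List.pyGetD (pvColK l k c) (k : Int) 0 = pvPref l c k := by
      rw [PySem.List.pyGetD_natCast]
      unfold pvColK
      rw [List.getD_eq_getElem?_getD, List.getElem?_map, List.getElem?_range (by omega)]
      simp
    simp only [List.foldl_cons, List.foldl_nil, hgd, PySem.List.pyGetD_natCast]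
    have hcast : ((k : Int) + 1) = (((k + 1 : Nat)) : Int) := by push_cast; ring
    rw [hcast, PySem.List.pySetD_natCast]
    rw [← pvPref_succ l c k hkl, pvColK_set l k c hkl]
theorem pvKeyS_beq (a b : Char) : (pvKeyS a == pvKeyS b) = decide (a = b) := by
  by_cases h : a = b
  · simp [h]
  · simp [h]
    intro he
    exact h (pvKeyS_inj he)
theorem pv_foldl_modify_mapDict {ν : Type} (K : List Char) : ∀ (D : List Char), K.Nodup → (∀ c ∈ K, c ∈ D) →
    ∀ (F : Char → ν) (dflt : ν) (h : String → ν → ν),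
    (K.map pvKeyS).foldl (fun d s => PySem.Dict.modify d s dflt (h s))
        (PySem.Dict.mk (D.map fun c => (pvKeyS c, F c)))
      = PySem.Dict.mk (D.map fun c => (pvKeyS c, if c ∈ K then h (pvKeyS c) (F c) else F c)) := by
  induction K with
  | nil => intro D _ _ F dflt h; simp
  | cons c0 K ih =>
    intro D hnd hsub F dflt h
    simp only [List.map_cons, List.foldl_cons]
    have hc0D : c0 ∈ D := hsub c0 (by simp)
    have hmod : PySem.Dict.modify (PySem.Dict.mk (D.map fun c => (pvKeyS c, F c))) (pvKeyS c0) dflt (h (pvKeyS c0))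
        = PySem.Dict.mk (D.map fun c => (pvKeyS c, if c = c0 then h (pvKeyS c0) (F c0) else F c)) := by
      simp only [PySem.Dict.modify]
      rw [pv_getD_mapDict, if_pos hc0D]
      apply PySem.Dict.ext
      rw [PySem.Dict.items_insert_of_contains _ _ (by rw [pv_contains_mapDict]; simpa using hc0D)]
      simp only [List.map_map]
      apply List.map_congr_left
      intro c hc
      simp only [Function.comp_apply, pvKeyS_beq]
      by_cases hcc : c = c0
      · subst hcc; simp
      · simp [hcc]
    rw [hmod, ih D hnd.of_cons (fun c hc => hsub c (by simp [hc]))]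
    congr 1
    apply List.map_congr_left
    intro c hc
    have hc0K : c0 ∉ K := (List.nodup_cons.mp hnd).1
    by_cases hcc : c = c0
    · subst hcc
      simp [hc0K]
    · simp [hcc]
theorem pv_count_inv (l : List Char) (k : Nat) (hk : k ≤ l.length) :
    (PySem.List.pyRange 0 (k : Int)).foldl (pvStepCount l)
        ((PySem.Dict.empty : PySem.Dict String (List Int)), (PySem.Dict.empty : PySem.Dict String Int))
      = (PySem.Dict.mk ((PySem.Set.ofList (l.take k)).map fun c => (pvKeyS c, pvColK l k c)),
         PySem.Dict.mk ((PySem.Set.ofList (l.take k)).map fun c => (pvKeyS c, pvPref l c k))) := by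
  induction k with
  | zero =>
    simp only [Nat.cast_zero, PySem.List.pyRange_one_eq_nil (le_refl 0), List.foldl_nil]
    rfl
  | succ k ih =>
    have hkl : k < l.length := by omega
    have hke : (((k + 1 : Nat)) : Int) = (k : Int) + 1 := by push_cast; ring
    rw [hke, PySem.List.pyRange_one_succ_right (by positivity), List.foldl_append,
      ih (by omega), List.foldl_cons, List.foldl_nil]
    set D := PySem.Set.ofList (l.take k) with hD
    set c0 := l.getD k ' ' with hc0
    have hDnd : D.Nodup := PySem.Set.nodup_ofList _
    have hmemD : ∀ c : Char, c ∈ D ↔ c ∈ l.take k := fun c => PySem.Set.mem_ofList _ _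
    have htake : l.take (k + 1) = l.take k ++ [c0] := by
      rw [List.take_add_one]
      simp [hc0, List.getD_eq_getElem?_getD, List.getElem?_eq_getElem hkl]
    have hD' : PySem.Set.ofList (l.take (k + 1)) = if c0 ∈ l.take k then D else D ++ [c0] := by
      rw [htake, PySem.Set.ofList_append, PySem.Set.update_cons, PySem.Set.update_nil,
        PySem.Set.add]
      have hcont : PySem.Set.contains D c0 = decide (c0 ∈ l.take k) := by
        by_cases h : c0 ∈ l.take k <;>
          simp [PySem.Set.contains, hmemD c0, h]
      by_cases h : c0 ∈ l.take k
      · rw [if_pos (by rw [hcont]; simp [h]), if_pos h]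
      · rw [if_neg (by rw [hcont]; simp [h]), if_neg h]
    have hpgd : PySem.List.pyGetD l ((k : Int)) ' ' = c0 := by
      rw [PySem.List.pyGetD_natCast]
    have hpref_c0 : pvPref l c0 (k + 1) = pvPref l c0 k + 1 := by
      rw [pvPref_succ l c0 k hkl, if_pos rfl]
    have hpref_other : ∀ c : Char, c ≠ c0 → pvPref l c (k + 1) = pvPref l c k := by
      intro c hc
      rw [pvPref_succ l c k hkl, if_neg (fun h => hc h.symm), add_zero]
    have hkey : ∀ c : Char, (String.ofList [c] : String) = pvKeyS c := fun _ => rfl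
    simp only [pvStepCount, hpgd, hkey]
    rw [pv_contains_mapDict]
    by_cases hmem : c0 ∈ l.take k
    case pos =>
      -- Symbol already a key of count: the else branch
      rw [if_neg (by simp [(hmemD c0).mpr hmem])]
      have hucc1 : PySem.Dict.insert (PySem.Dict.mk (D.map fun c => (pvKeyS c, pvPref l c k)))
            (pvKeyS c0) (PySem.Dict.getD (PySem.Dict.mk (D.map fun c => (pvKeyS c, pvPref l c k))) (pvKeyS c0) 0 + 1)
          = PySem.Dict.mk (D.map fun c => (pvKeyS c, pvPref l c (k + 1))) := by
        rw [pv_getD_mapDict, if_pos ((hmemD c0).mpr hmem)]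
        apply PySem.Dict.ext
        rw [PySem.Dict.items_insert_of_contains _ _ (by rw [pv_contains_mapDict]; simp [(hmemD c0).mpr hmem])]
        simp only [List.map_map]
        apply List.map_congr_left
        intro c hc
        simp only [Function.comp_apply, pvKeyS_beq]
        by_cases hcc : c = c0
        · subst hcc; simp [hpref_c0]
        · simp [hcc, hpref_other c hcc]
      rw [hucc1]
      have hkeys : PySem.Dict.keys (PySem.Dict.mk (D.map fun c => (pvKeyS c, pvPref l c (k + 1))))
          = D.map pvKeyS := by
        rw [PySem.Dict.keys_mk]; simp
      rw [hkeys, pv_foldl_modify_mapDict D D hDnd (fun c hc => hc) _ _ _]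
      rw [hD', if_pos hmem]
      congr 1
      apply congrArg
      apply List.map_congr_left
      intro c hc
      rw [if_pos hc, pv_getD_mapDict, if_pos hc]
      have : ((k : Int) + 1) = (((k + 1 : Nat)) : Int) := by push_cast; ring
      rw [this, PySem.List.pySetD_natCast, pvColK_set l k c hkl]
    case neg =>
      -- new symbol: the then branch
      rw [if_pos (by simp; exact fun h => hmem ((hmemD c0).mp h))]
      have hc0D : c0 ∉ D := fun h => hmem ((hmemD c0).mp h)
      have hndD' : (D ++ [c0]).Nodup := by
        simp [List.nodup_append, hDnd]
        exact fun a ha hac => hc0D (hac ▸ ha)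
      have hcnt1 : PySem.Dict.insert (PySem.Dict.mk (D.map fun c => (pvKeyS c, pvColK l k c)))
            (pvKeyS c0) (List.replicate (l.length + 1) (0 : Int))
          = PySem.Dict.mk ((D ++ [c0]).map fun c => (pvKeyS c, pvColK l k c)) := by
        apply PySem.Dict.ext
        rw [PySem.Dict.items_insert_of_not_contains _ _ (by rw [pv_contains_mapDict]; simpa using hc0D)]
        simp [pvColK_zero_of_not_mem l k c0 hmem]
      have hucc1 : PySem.Dict.insert (PySem.Dict.mk (D.map fun c => (pvKeyS c, pvPref l c k)))
            (pvKeyS c0) (1 : Int)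
          = PySem.Dict.mk ((D ++ [c0]).map fun c => (pvKeyS c, pvPref l c (k + 1))) := by
        apply PySem.Dict.ext
        rw [PySem.Dict.items_insert_of_not_contains _ _ (by rw [pv_contains_mapDict]; simpa using hc0D)]
        simp only [List.map_append, List.map_cons, List.map_nil]
        congr 1
        · apply List.map_congr_left
          intro c hc
          rw [hpref_other c (fun h => hc0D (h ▸ hc))]
        · have : pvPref l c0 (k + 1) = 1 := by
            rw [hpref_c0, pvPref_zero_of_not_mem l c0 k k (le_refl k) hmem]
            ring
          simp [this]
      rw [hcnt1, hucc1]
      have hkeys : PySem.Dict.keys (PySem.Dict.mk ((D ++ [c0]).map fun c => (pvKeyS c, pvPref l c (k + 1))))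
          = (D ++ [c0]).map pvKeyS := by
        rw [PySem.Dict.keys_mk]; simp
      rw [hkeys, pv_foldl_modify_mapDict (D ++ [c0]) (D ++ [c0]) hndD' (fun c hc => hc) _ _ _]
      rw [hD', if_neg hmem]
      congr 1
      apply congrArg
      apply List.map_congr_left
      intro c hc
      rw [if_pos hc, pv_getD_mapDict, if_pos hc]
      have : ((k : Int) + 1) = (((k + 1 : Nat)) : Int) := by push_cast; ring
      rw [this, PySem.List.pySetD_natCast, pvColK_set l k c hkl]
theorem pv_first_inv' (u0 : Char) (rest : List Char) (k : Nat) (h1 : 1 ≤ k)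
    (hk : k ≤ (u0 :: rest).length) (d0 : PySem.Dict String Int) :
    (PySem.List.pyRange 0 (k : Int)).foldl (pvStepFirst (u0 :: rest)) (d0, u0)
      = ((PySem.List.pyRange 1 (k : Int)).foldl (pvStepFirstAlt (u0 :: rest)) d0,
         (u0 :: rest).getD (k - 1) ' ') :=
  pv_first_inv (u0 :: rest) k h1 hk d0
theorem pv_main (bwt : String) (hpre : bwt ≠ "") : PreprocessBWT bwt = PreprocessBWT_alt bwt := by
  have hl : bwt.toList ≠ [] := by
    intro h
    apply hpre
    have := congrArg String.ofList h
    simpa using this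
  have hfne : PySem.List.sorted bwt.toList (fun c => c) ≠ [] := by
    rw [Ne, PySem.List.sorted_eq_nil_iff]
    exact hl
  obtain ⟨u0, rest, hfst⟩ := List.exists_cons_of_ne_nil hfne
  have hflen : (u0 :: rest).length = bwt.toList.length := by
    rw [← hfst]
    exact PySem.List.length_sorted _ _ _
  have hn1 : 1 ≤ bwt.toList.length := by
    cases h : bwt.toList with
    | nil => exact absurd h hl
    | cons a t => simp
  simp only [PreprocessBWT, PreprocessBWT_alt]
  rw [hfst]
  dsimp only
  rw [PySem.List.foldl_prod_mk (f := pvStepFirst (u0 :: rest)) (g := pvStepCount bwt.toList)]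
  rw [pv_first_inv' u0 rest bwt.toList.length hn1 (by omega) _]
  rw [pv_count_inv bwt.toList bwt.toList.length (le_refl _)]
  have hcol : ∀ c : Char,
      (PySem.List.pyRange 0 ((bwt.toList.length : Nat) : Int)).foldl
        (fun col i => PySem.List.pySetD col (i + 1)
          (PySem.List.pyGetD col i 0 + if PySem.List.pyGetD bwt.toList i ' ' = c then 1 else 0))
        (List.replicate (bwt.toList.length + 1) (0 : Int)) = pvColK bwt.toList bwt.toList.length c :=
    fun c => pv_col_alt bwt.toList c bwt.toList.length (le_refl _)
  simp only [hcol, hflen, List.take_length, PySem.List.dedup_eq_ofList]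
  rw [PySem.Dict.items_foldl_insert_fresh _ (fun c => String.ofList [c]) _ _
    (fun a _ => PySem.Dict.contains_empty _)
    (by
      have := (PySem.Set.nodup_ofList (α := Char) bwt.toList).map (f := pvKeyS) pvKeyS_inj
      simpa [pvKeyS] using this)]
  simp [pvKeyS]
  rfl

-- ===== VERDICT (by name: the statement is the Claim_ definition above) =====
theorem PreprocessBWT_spec : Claim_equal_PreprocessBWT := by
  intro bwt _ hpre
  unfold Spec_PreprocessBWT
  exact pv_main bwt hpre

theorem PreprocessBWT_raises : Claim_raises_PreprocessBWT := by
  unfold Claim_raises_PreprocessBWT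
  exact ⟨fun bwt _ hr hp => hp hr, by decide⟩

-- sanity: the witness value stated in Claim_raises_PreprocessBWT is B's value on the empty string
theorem pv_raise_value_ok : PreprocessBWT_alt "" = ([("$", 0)], []) :=
  PreprocessBWT_raises.2.2.2
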